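-- pv_equiv track=rewrite | github.com/markvp/hacs_waste_collection_schedule | custom_components/waste_collection_schedule/waste_collection_schedule/source/hornsby_nsw_gov_au.py | _select_weekly_waste_calendar_pdf_href
-- ===== SOURCE A (Python) =====
-- def _select_weekly_waste_calendar_pdf_href(hrefs: list[str]) -> str | None:
--     """Select the weekly waste calendar PDF URL from the list of hrefs."""
--     pdfs = [h for h in hrefs if h.lower().endswith(".pdf")]
--     if not pdfs:
--         return None
--
--     # Strong signal: weekly waste calendar under 'suds-waste-and-recycling'
--     cand = [
--         h
--         for h in pdfs
--         if "collection-calendars" in h and "suds-waste-and-recycling" in h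
--     ]
--     if cand:
--         return cand[0]
--
--     # Fallback: any collection-calendars PDF that doesn't look like bulky-waste
--     cand = [
--         h
--         for h in pdfs
--         if "collection-calendars" in h
--         and "bulky" not in h.lower()
--         and "suds-bulky-waste" not in h.lower()
--     ]
--     if cand:
--         return cand[0]
--
--     return pdfs[0]
-- ===== SOURCE B (Python) =====
-- def _select_weekly_waste_calendar_pdf_href(hrefs: list[str]) -> str | None:
--     """Single pass: remember the first PDF, the first strong match and the
--     first fallback match, then return by priority."""
--     first_pdf = first_strong = first_fallback = None
--     for h in hrefs:
--         low = h.lower()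
--         if not low.endswith(".pdf"):
--             continue
--         if first_pdf is None:
--             first_pdf = h
--         if (first_strong is None
--                 and "collection-calendars" in h
--                 and "suds-waste-and-recycling" in h):
--             first_strong = h
--         if (first_fallback is None
--                 and "collection-calendars" in h
--                 and "bulky" not in low
--                 and "suds-bulky-waste" not in low):
--             first_fallback = h
--     if first_strong is not None:
--         return first_strong
--     if first_fallback is not None:
--         return first_fallback
--     return first_pdf
-- ===== Notes on version B (the rewrite author's own statement) =====
-- stated objective: alternative
-- what changed: Replaces A's four list passes (pdf filter plus three filter scans with indexing) by a single loop over hrefs that records the first pdf, first strong match and first fallback match, then returns by priority.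
import Mathlib
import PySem

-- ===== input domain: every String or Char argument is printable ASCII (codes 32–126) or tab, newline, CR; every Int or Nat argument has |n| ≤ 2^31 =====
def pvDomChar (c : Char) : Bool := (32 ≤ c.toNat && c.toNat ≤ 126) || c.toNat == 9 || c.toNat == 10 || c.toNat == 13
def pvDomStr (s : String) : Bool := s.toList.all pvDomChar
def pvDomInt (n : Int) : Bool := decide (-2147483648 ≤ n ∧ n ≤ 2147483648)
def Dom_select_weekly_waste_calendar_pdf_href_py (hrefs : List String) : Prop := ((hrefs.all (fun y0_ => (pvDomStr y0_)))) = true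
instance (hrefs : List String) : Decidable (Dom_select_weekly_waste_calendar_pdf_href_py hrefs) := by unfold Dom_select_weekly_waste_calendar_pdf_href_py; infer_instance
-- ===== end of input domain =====

-- B replaces A's four list passes (pdf filter + three filter scans) by one loop that
-- remembers the first pdf, first strong match and first fallback match (objective: alternative single-pass decomposition).

-- ===== PORT A =====
-- the three membership tests of A, exactly as A writes them
def pvIsPdf (h : String) : Bool := PySem.Str.endswith (PySem.Str.lower h) ".pdf"
def pvStrong (h : String) : Bool :=
  PySem.Str.isIn "collection-calendars" h && PySem.Str.isIn "suds-waste-and-recycling" h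
def pvFallback (h : String) : Bool :=
  PySem.Str.isIn "collection-calendars" h
    && !(PySem.Str.isIn "bulky" (PySem.Str.lower h))
    && !(PySem.Str.isIn "suds-bulky-waste" (PySem.Str.lower h))

def select_weekly_waste_calendar_pdf_href_py (hrefs : List String) : Option String :=
  let pdfs := hrefs.filter pvIsPdf
  if pdfs.isEmpty then none
  else
    let cand := pdfs.filter pvStrong
    if !cand.isEmpty then cand.head?
    else
      let cand2 := pdfs.filter pvFallback
      if !cand2.isEmpty then cand2.head?
      else pdfs.head?

-- ===== PORT B =====
-- single pass; `low` computed once per href, as in Source B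
def pvSelLoop : List String → Option String → Option String → Option String →
    Option String × Option String × Option String
  | [], p, s, f => (p, s, f)
  | h :: t, p, s, f =>
    let low := PySem.Str.lower h
    if !(PySem.Str.endswith low ".pdf") then pvSelLoop t p s f
    else
      let p' := if p.isNone then some h else p
      let s' := if s.isNone && PySem.Str.isIn "collection-calendars" h
                    && PySem.Str.isIn "suds-waste-and-recycling" h then some h else s
      let f' := if f.isNone && PySem.Str.isIn "collection-calendars" h
                    && !(PySem.Str.isIn "bulky" low)
                    && !(PySem.Str.isIn "suds-bulky-waste" low) then some h else f
      pvSelLoop t p' s' f'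

def select_weekly_waste_calendar_pdf_href_py_alt (hrefs : List String) : Option String :=
  match pvSelLoop hrefs none none none with
  | (p, s, f) =>
    match s with
    | some x => some x
    | none =>
      match f with
      | some x => some x
      | none => p

-- ===== PRECONDITION & SPEC =====
def Spec_select_weekly_waste_calendar_pdf_href_py (hrefs : List String) (out : Option String) : Prop := out = select_weekly_waste_calendar_pdf_href_py_alt hrefs
instance (hrefs : List String) (out : Option String) : Decidable (Spec_select_weekly_waste_calendar_pdf_href_py hrefs out) := by unfold Spec_select_weekly_waste_calendar_pdf_href_py; infer_instance

-- ===== CLAIM (what is proved, stated in full; the proofs are below) =====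
def Claim_equal_select_weekly_waste_calendar_pdf_href_py : Prop := ∀ (hrefs : List String), Dom_select_weekly_waste_calendar_pdf_href_py hrefs → Spec_select_weekly_waste_calendar_pdf_href_py hrefs (select_weekly_waste_calendar_pdf_href_py hrefs)

-- ===== LEMMAS AND PROOFS =====

/-- "keep the first value seen": `o` if already set, else `x`. -/
def pvOrO (o x : Option String) : Option String := if o.isNone then x else o

theorem pvOrO_none (x : Option String) : pvOrO none x = x := rfl

/-- loop invariant: the loop returns each accumulator unless previously unset,
in which case it returns the head of the corresponding filtered list. -/
theorem pvSelLoop_spec (l : List String) : ∀ p s f,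
    pvSelLoop l p s f =
      (pvOrO p ((l.filter pvIsPdf).head?),
       pvOrO s (((l.filter pvIsPdf).filter pvStrong).head?),
       pvOrO f (((l.filter pvIsPdf).filter pvFallback).head?)) := by
  induction l with
  | nil => intro p s f; cases p <;> cases s <;> cases f <;> rfl
  | cons h t ih =>
    intro p s f
    by_cases hp : pvIsPdf h = true
    · have hloop : pvSelLoop (h :: t) p s f =
          pvSelLoop t (pvOrO p (some h))
            (if s.isNone && pvStrong h then some h else s)
            (if f.isNone && pvFallback h then some h else f) := by
        simp only [pvSelLoop, pvIsPdf, pvStrong, pvFallback, pvOrO] at hp ⊢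
        rw [hp]
        simp [Bool.and_assoc]
      rw [hloop, ih]
      by_cases hs : pvStrong h = true <;> by_cases hf : pvFallback h = true <;>
        simp only [List.filter_cons, hp, hs, hf, if_true, List.head?_cons,
          Bool.and_true, Bool.and_false] <;>
        cases p <;> cases s <;> cases f <;> rfl
    · have hp' : pvIsPdf h = false := by simpa using hp
      have hloop : pvSelLoop (h :: t) p s f = pvSelLoop t p s f := by
        simp only [pvSelLoop, pvIsPdf] at hp' ⊢
        rw [hp']
        simp
      rw [hloop, ih]
      simp [List.filter_cons_of_neg, hp']

-- ===== VERDICT (by name: the statement is the Claim_ definition above) =====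
theorem select_weekly_waste_calendar_pdf_href_py_spec : Claim_equal_select_weekly_waste_calendar_pdf_href_py := by
  intro hrefs _
  unfold Spec_select_weekly_waste_calendar_pdf_href_py
  unfold select_weekly_waste_calendar_pdf_href_py select_weekly_waste_calendar_pdf_href_py_alt
  rw [pvSelLoop_spec hrefs none none none]
  simp only [pvOrO_none]
  cases hpdfs : hrefs.filter pvIsPdf with
  | nil => rfl
  | cons a rest =>
    simp only [List.isEmpty_cons, if_neg Bool.false_ne_true]
    cases hc1 : (a :: rest).filter pvStrong with
    | cons b r1 => simp
    | nil =>
      simp only [List.isEmpty_nil, Bool.not_true, List.head?_nil]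
      cases hc2 : (a :: rest).filter pvFallback with
      | cons c r2 => simp
      | nil => simp
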